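-- pv_equiv track=rewrite | github.com/ericwzc/tools | algorithm/bool/boolcut.py | dobinarize
-- ===== SOURCE A (Python) =====
-- def dobinarize(ad, memo):
--     negate= False
--     for i in ad:
--         if negate:
--            memo[i] = '0';
--            negate = False
--            continue
--         if i == '!':
--            negate= True
--         else:
--            memo[i] = '1'
--
--     keys = [ k for k in sorted(memo.keys()) if memo[k] == '*']
--
--     tuples = []
--     if keys:
--        paddedTuple(memo, keys, tuples)
--     else:
--        tuples.append(tuple(memo[i] for i in sorted(memo.keys())))
--     return tuples
--
-- def paddedTuple(eleMap, keys, tuples):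
--     if keys:
--         for i in ['0', '1']:
--             eleMap[keys[0]] = i
--             paddedTuple(eleMap, keys[1:], tuples)
--     else:
--         tuples.append(tuple(eleMap[i] for i in sorted(eleMap.keys())))
-- ===== SOURCE B (Python) =====
-- def dobinarize(ad, memo):
--     # Same literal pass as the original; wildcard expansion done iteratively
--     # (breadth-first product table) instead of recursively; equivalence is about
--     # the return value (this version does not leave memo's '*' entries overwritten).
--     negate = False
--     for ch in ad:
--         if negate:
--             memo[ch] = '0'
--             negate = False
--         elif ch == '!':
--             negate = True
--         else:
--             memo[ch] = '1'
--     skeys = sorted(memo.keys())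
--     wild = [k for k in skeys if memo[k] == '*']
--     combos = [()]
--     for _ in wild:
--         combos = [c + (b,) for c in combos for b in ['0', '1']]
--     out = []
--     for combo in combos:
--         view = dict(memo)
--         view.update(zip(wild, combo))
--         out.append(tuple(view[k] for k in skeys))
--     return out
-- ===== Notes on version B (the rewrite author's own statement) =====
-- stated objective: alternative
-- what changed: The recursive paddedTuple backtracking (which threads one mutated dict through the whole recursion) is replaced by an iteratively built product table of value tuples, each emitted row read from a fresh per-combination view of the dict; the empty-wildcard special case disappears because the empty product yields one empty combination.
import Mathlib
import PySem

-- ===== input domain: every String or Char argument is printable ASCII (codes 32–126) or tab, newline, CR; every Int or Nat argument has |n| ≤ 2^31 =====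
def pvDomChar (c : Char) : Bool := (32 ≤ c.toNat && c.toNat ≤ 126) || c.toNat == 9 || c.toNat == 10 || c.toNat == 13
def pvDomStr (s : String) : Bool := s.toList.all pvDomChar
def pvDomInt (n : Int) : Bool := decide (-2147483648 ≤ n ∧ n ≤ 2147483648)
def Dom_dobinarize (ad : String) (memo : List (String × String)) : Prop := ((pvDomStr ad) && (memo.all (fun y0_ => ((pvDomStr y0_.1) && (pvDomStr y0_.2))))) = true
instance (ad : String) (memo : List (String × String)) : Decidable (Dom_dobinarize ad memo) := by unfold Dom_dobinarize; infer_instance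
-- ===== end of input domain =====

-- B replaces the recursive wildcard expansion (paddedTuple) by an iteratively
-- built product table of value tuples; equivalence is about the RETURN value
-- (A additionally leaves memo's '*' entries overwritten, B's views do not).

-- ===== PORT A =====

-- the literal pass over ad (identical source code in A and B): state (negate, memo)
def pvLitPass (ad : String) (memo : List (String × String)) :
    Bool × PySem.Dict String String :=
  ad.toList.foldl
    (fun s i =>
      if s.1 then (false, s.2.insert (String.ofList [i]) "0")
      else if i = '!' then (true, s.2)
      else (s.1, s.2.insert (String.ofList [i]) "1"))
    (false, PySem.Dict.ofList memo)

-- tuple(eleMap[i] for i in sorted(eleMap.keys())); every looked-up key is a key of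
-- eleMap, so getD with a dummy default is exact here
def pvRow (m : PySem.Dict String String) : List String :=
  (PySem.List.sorted m.keys (fun k => k) false).map (fun i => m.getD i "")

-- paddedTuple; the for-loop over the two-element list ['0','1'] is unrolled
def pvPaddedTuple : PySem.Dict String String → List String → List (List String) →
    PySem.Dict String String × List (List String)
  | m, [], ts => (m, ts ++ [pvRow m])
  | m, k :: rest, ts =>
      let s0 := pvPaddedTuple (m.insert k "0") rest ts
      pvPaddedTuple (s0.1.insert k "1") rest s0.2

def dobinarize (ad : String) (memo : List (String × String)) : List (List String) :=
  let m := (pvLitPass ad memo).2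
  let keys := (PySem.List.sorted m.keys (fun k => k) false).filter
    (fun k => m.getD k "" == "*")
  if keys.isEmpty then [pvRow m] else (pvPaddedTuple m keys []).2

-- ===== PORT B =====

-- view.update(zip(wild, combo))
def pvUpdatePairs (m : PySem.Dict String String) (ps : List (String × String)) :
    PySem.Dict String String :=
  ps.foldl (fun d p => d.insert p.1 p.2) m

def dobinarize_alt (ad : String) (memo : List (String × String)) : List (List String) :=
  let m := (pvLitPass ad memo).2
  let skeys := PySem.List.sorted m.keys (fun k => k) false
  let wild := skeys.filter (fun k => m.getD k "" == "*")
  let combos := wild.foldl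
    (fun acc _ => acc.flatMap (fun c => ["0", "1"].map (fun b => c ++ [b]))) [[]]
  combos.map (fun c =>
    let view := pvUpdatePairs m (wild.zip c)
    skeys.map (fun k => view.getD k ""))

-- ===== PRECONDITION & SPEC =====
def Spec_dobinarize (ad : String) (memo : List (String × String)) (out : List (List String)) : Prop := out = dobinarize_alt ad memo
instance (ad : String) (memo : List (String × String)) (out : List (List String)) : Decidable (Spec_dobinarize ad memo out) := by unfold Spec_dobinarize; infer_instance

-- ===== CLAIM (what is proved, stated in full; the proofs are below) =====
def Claim_equal_dobinarize : Prop := ∀ (ad : String) (memo : List (String × String)), Dom_dobinarize ad memo → Spec_dobinarize ad memo (dobinarize ad memo)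

-- ===== LEMMAS AND PROOFS =====

-- extensional equality of dicts: same key list, same lookups
def dEq (m m' : PySem.Dict String String) : Prop :=
  m.keys = m'.keys ∧ ∀ k, m.getD k "" = m'.getD k ""

theorem dEq_refl (m : PySem.Dict String String) : dEq m m := ⟨rfl, fun _ => rfl⟩

theorem dEq_trans {a b c : PySem.Dict String String} (h1 : dEq a b) (h2 : dEq b c) :
    dEq a c := ⟨h1.1.trans h2.1, fun k => (h1.2 k).trans (h2.2 k)⟩

theorem keys_insert_ite (m : PySem.Dict String String) (k v) :
    (m.insert k v).keys = if k ∈ m.keys then m.keys else m.keys ++ [k] := by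
  by_cases h : k ∈ m.keys
  · rw [if_pos h, PySem.Dict.keys_insert_of_contains]
    exact (PySem.Dict.contains_iff_mem_keys _ _).mpr h
  · rw [if_neg h, PySem.Dict.keys_insert_of_not_contains]
    simp [PySem.Dict.contains_eq_decide_mem_keys, h]

theorem dEq_insert_congr {m m' : PySem.Dict String String} (h : dEq m m') (k v) :
    dEq (m.insert k v) (m'.insert k v) := by
  refine ⟨?_, fun j => ?_⟩
  · rw [keys_insert_ite, keys_insert_ite, h.1]
  · rw [PySem.Dict.getD_insert, PySem.Dict.getD_insert]
    split_ifs with hj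
    · rfl
    · exact h.2 j

theorem dEq_insert_comm (m : PySem.Dict String String) {k k' : String} (h : k ≠ k')
    (hk' : k' ∈ m.keys) (v v' : String) :
    dEq ((m.insert k v).insert k' v') ((m.insert k' v').insert k v) := by
  refine ⟨?_, fun j => PySem.Dict.getD_insert_insert_comm m v v' h j ""⟩
  rw [keys_insert_ite, keys_insert_ite, keys_insert_ite, keys_insert_ite]
  by_cases h1 : k ∈ m.keys <;>
    simp [h1, hk', Ne.symm h, List.mem_append]

theorem dEq_updatePairs_congr {m m' : PySem.Dict String String} (h : dEq m m')
    (ps : List (String × String)) : dEq (pvUpdatePairs m ps) (pvUpdatePairs m' ps) := by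
  induction ps generalizing m m' with
  | nil => exact h
  | cons p ps ih => exact ih (dEq_insert_congr h p.1 p.2)

-- pull an insert of a key not touched by ps out of pvUpdatePairs
theorem dEq_insert_updatePairs (ps : List (String × String)) :
    ∀ (m : PySem.Dict String String) (k v), k ∉ ps.map Prod.fst → k ∈ m.keys →
    dEq ((pvUpdatePairs m ps).insert k v) (pvUpdatePairs (m.insert k v) ps) := by
  induction ps with
  | nil => exact fun m k v _ _ => dEq_refl _
  | cons p ps ih =>
      intro m k v hk hkm
      simp only [List.map_cons, List.mem_cons, not_or] at hk
      have hkm' : k ∈ (m.insert p.1 p.2).keys :=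
        (PySem.Dict.mem_keys_insert _ _ _ _).mpr (Or.inr hkm)
      have h1 := ih (m.insert p.1 p.2) k v hk.2 hkm'
      have h2 := dEq_updatePairs_congr (dEq_insert_comm m (Ne.symm hk.1) hkm p.2 v) ps
      exact dEq_trans h1 h2

-- overwriting the same nodup key block twice: only the second assignment matters
theorem dEq_overwrite : ∀ (ks : List String), ks.Nodup →
    ∀ (c c' : List String) (m : PySem.Dict String String),
    c.length = ks.length → c'.length = ks.length →
    dEq (pvUpdatePairs (pvUpdatePairs m (ks.zip c')) (ks.zip c))
        (pvUpdatePairs m (ks.zip c)) := by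
  intro ks
  induction ks with
  | nil => intro _ c c' m _ _; exact dEq_refl _
  | cons k ks ih =>
      intro hnd c c' m hc hc'
      match c, c' with
      | v :: c, v' :: c' =>
        simp only [List.length_cons, Nat.succ.injEq] at hc hc'
        simp only [List.nodup_cons] at hnd
        simp only [List.zip_cons_cons, pvUpdatePairs, List.foldl_cons]
        show dEq (pvUpdatePairs ((pvUpdatePairs (m.insert k v') (ks.zip c')).insert k v) (ks.zip c)) _
        have hout : k ∉ (ks.zip c').map Prod.fst := by
          intro hmem
          exact hnd.1 (by
            have := List.mem_map.mp hmem
            obtain ⟨p, hp, hpe⟩ := this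
            obtain ⟨a, b⟩ := p
            exact hpe ▸ (List.of_mem_zip hp).1)
        have hkm : k ∈ (m.insert k v').keys :=
          (PySem.Dict.mem_keys_insert _ _ _ _).mpr (Or.inl rfl)
        have h1 := dEq_updatePairs_congr
          (dEq_insert_updatePairs (ks.zip c') (m.insert k v') k v hout hkm) (ks.zip c)
        have h2 : dEq (pvUpdatePairs (pvUpdatePairs ((m.insert k v').insert k v) (ks.zip c')) (ks.zip c))
            (pvUpdatePairs (m.insert k v) (ks.zip c)) := by
          rw [PySem.Dict.insert_insert_self]
          exact ih hnd.2 c c' (m.insert k v) hc hc'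
        exact dEq_trans h1 h2

theorem pvRow_congr {m m' : PySem.Dict String String} (h : dEq m m') :
    pvRow m = pvRow m' := by
  unfold pvRow
  rw [h.1]
  exact List.map_congr_left (fun i _ => h.2 i)

-- lexicographic list of all {'0','1'}-tuples of length n, first position slowest
def combosN : Nat → List (List String)
  | 0 => [[]]
  | n + 1 => ["0", "1"].flatMap (fun b => (combosN n).map (b :: ·))

theorem length_mem_combosN : ∀ n c, c ∈ combosN n → c.length = n := by
  intro n
  induction n with
  | zero => intro c hc; simp [combosN] at hc; simp [hc]
  | succ n ih =>
      intro c hc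
      simp only [combosN, List.mem_flatMap, List.mem_map] at hc
      obtain ⟨b, _, d, hd, rfl⟩ := hc
      simp [ih d hd]

theorem combosN_succ_snoc (n : Nat) :
    combosN (n + 1) = (combosN n).flatMap (fun c => ["0", "1"].map (fun b => c ++ [b])) := by
  induction n with
  | zero => rfl
  | succ n ih =>
      show ["0", "1"].flatMap (fun b => (combosN (n+1)).map (b :: ·)) = _
      conv_lhs => rw [ih]
      rw [combosN]
      simp [List.map_flatMap, List.flatMap_map]

theorem foldl_combos (l : List String) : ∀ n,
    l.foldl (fun acc _ => acc.flatMap (fun c => ["0", "1"].map (fun b => c ++ [b])))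
      (combosN n) = combosN (n + l.length) := by
  induction l with
  | nil => intro n; rfl
  | cons x l ih =>
      intro n
      simp only [List.foldl_cons, List.length_cons]
      rw [← combosN_succ_snoc, ih]
      ring_nf

-- the key characterisation of A's recursive paddedTuple
theorem paddedTuple_spec : ∀ (ks : List String), ks.Nodup →
    ∀ (m : PySem.Dict String String) (ts : List (List String)),
    (pvPaddedTuple m ks ts).2 =
      ts ++ (combosN ks.length).map (fun c => pvRow (pvUpdatePairs m (ks.zip c)))
    ∧ dEq (pvPaddedTuple m ks ts).1
        (pvUpdatePairs m (ks.zip (List.replicate ks.length "1"))) := by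
  intro ks
  induction ks with
  | nil =>
      intro _ m ts
      exact ⟨by simp [pvPaddedTuple, combosN, pvUpdatePairs], dEq_refl m⟩
  | cons k ks ih =>
      intro hnd m ts
      simp only [List.nodup_cons] at hnd
      have ih0 := ih hnd.2 (m.insert k "0") ts
      set s0 := pvPaddedTuple (m.insert k "0") ks ts with hs0
      have ih1 := ih hnd.2 (s0.1.insert k "1") s0.2
      -- dEq between the threaded dict-with-"1" and the fresh m.insert k "1", after a full overwrite
      have hbase : ∀ c : List String, c.length = ks.length →
          dEq (pvUpdatePairs (s0.1.insert k "1") (ks.zip c))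
              (pvUpdatePairs (m.insert k "1") (ks.zip c)) := by
        intro c hc
        have hkout : k ∉ (ks.zip (List.replicate ks.length "1")).map Prod.fst := by
          intro hmem
          obtain ⟨p, hp, hpe⟩ := List.mem_map.mp hmem
          obtain ⟨a, b⟩ := p
          exact hnd.1 (hpe ▸ (List.of_mem_zip hp).1)
        have e1 : dEq (s0.1.insert k "1")
            ((pvUpdatePairs (m.insert k "0") (ks.zip (List.replicate ks.length "1"))).insert k "1") :=
          dEq_insert_congr ih0.2 k "1"
        have e2 := dEq_insert_updatePairs (ks.zip (List.replicate ks.length "1"))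
          (m.insert k "0") k "1" hkout
          ((PySem.Dict.mem_keys_insert _ _ _ _).mpr (Or.inl rfl))
        have e3 : dEq (s0.1.insert k "1")
            (pvUpdatePairs (m.insert k "1") (ks.zip (List.replicate ks.length "1"))) := by
          have := dEq_trans e1 e2
          rwa [PySem.Dict.insert_insert_self] at this
        have e4 := dEq_updatePairs_congr e3 (ks.zip c)
        have e5 := dEq_overwrite ks hnd.2 c (List.replicate ks.length "1")
          (m.insert k "1") hc (by simp)
        exact dEq_trans e4 e5
      constructor
      · show (pvPaddedTuple (s0.1.insert k "1") ks s0.2).2 = _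
        rw [ih1.1, ih0.1, List.append_assoc]
        congr 1
        show _ = (combosN (ks.length + 1)).map (fun c => pvRow (pvUpdatePairs m ((k :: ks).zip c)))
        rw [combosN]
        simp only [List.flatMap_cons, List.flatMap_nil, List.map_append, List.map_map,
          List.append_nil, Function.comp_def, List.zip_cons_cons]
        congr 1
        refine List.map_congr_left (fun c hc => ?_)
        exact pvRow_congr (hbase c (length_mem_combosN _ c hc))
      · show dEq (pvPaddedTuple (s0.1.insert k "1") ks s0.2).1 _
        refine dEq_trans ih1.2 ?_
        show dEq _ (pvUpdatePairs m ((k :: ks).zip (List.replicate (ks.length + 1) "1")))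
        simp only [List.replicate_succ, List.zip_cons_cons, pvUpdatePairs, List.foldl_cons]
        exact hbase (List.replicate ks.length "1") (by simp)

-- the literal pass keeps the key list duplicate-free
theorem nodup_litPass (ad : String) (memo : List (String × String)) :
    (pvLitPass ad memo).2.keys.Nodup := by
  unfold pvLitPass
  generalize hinit : ((false, PySem.Dict.ofList memo) : Bool × PySem.Dict String String) = s
  have hs : s.2.keys.Nodup := by rw [← hinit]; exact PySem.Dict.nodup_keys_ofList memo
  clear hinit
  induction ad.toList generalizing s with
  | nil => exact hs
  | cons i l ih =>
      simp only [List.foldl_cons]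
      apply ih
      dsimp only
      split_ifs <;> first | exact hs | exact PySem.Dict.nodup_keys_insert _ _ _ hs

-- updating only existing keys does not change the key list
theorem keys_updatePairs (ps : List (String × String)) :
    ∀ (m : PySem.Dict String String), (∀ p ∈ ps, p.1 ∈ m.keys) →
    (pvUpdatePairs m ps).keys = m.keys := by
  induction ps with
  | nil => intro m _; rfl
  | cons p ps ih =>
      intro m hmem
      have hk : (m.insert p.1 p.2).keys = m.keys := by
        rw [keys_insert_ite, if_pos (hmem p (List.mem_cons_self))]
      show (pvUpdatePairs (m.insert p.1 p.2) ps).keys = m.keys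
      rw [ih (m.insert p.1 p.2) (fun q hq => hk ▸ hmem q (List.mem_cons_of_mem _ hq)), hk]

-- the core equality, stated on the post-literal-pass dict
theorem main_eq (m : PySem.Dict String String) (hnodupm : m.keys.Nodup) :
    (if ((PySem.List.sorted m.keys (fun k => k) false).filter
          (fun k => m.getD k "" == "*")).isEmpty then [pvRow m]
     else (pvPaddedTuple m ((PySem.List.sorted m.keys (fun k => k) false).filter
          (fun k => m.getD k "" == "*")) []).2) =
    (((PySem.List.sorted m.keys (fun k => k) false).filter
          (fun k => m.getD k "" == "*")).foldl
        (fun acc _ => acc.flatMap (fun c => ["0", "1"].map (fun b => c ++ [b]))) [[]]).map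
      (fun c =>
        (PySem.List.sorted m.keys (fun k => k) false).map
          (fun k => (pvUpdatePairs m
            (((PySem.List.sorted m.keys (fun k => k) false).filter
              (fun k => m.getD k "" == "*")).zip c)).getD k "")) := by
  set skeys := PySem.List.sorted m.keys (fun k => k) false with hsk
  set wild := skeys.filter (fun k => m.getD k "" == "*") with hw
  have hnodupsk : skeys.Nodup :=
    ((PySem.List.sorted_perm m.keys (fun k => k) false).nodup_iff).mpr hnodupm
  have hnodupw : wild.Nodup := hnodupsk.filter _
  have hwmem : ∀ k ∈ wild, k ∈ m.keys := by
    intro k hk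
    have := List.mem_of_mem_filter hk
    exact (PySem.List.mem_sorted _ _ _ _).mp this
  have hrow : ∀ c : List String,
      pvRow (pvUpdatePairs m (wild.zip c)) =
      skeys.map (fun k => (pvUpdatePairs m (wild.zip c)).getD k "") := by
    intro c
    unfold pvRow
    rw [keys_updatePairs _ _ (fun p hp => hwmem p.1 (List.of_mem_zip hp).1)]
  have hcombos : wild.foldl
      (fun acc _ => acc.flatMap (fun c => ["0", "1"].map (fun b => c ++ [b]))) [[]]
      = combosN wild.length := by
    have := foldl_combos wild 0
    simpa using this
  rw [hcombos]
  by_cases hemp : wild.isEmpty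
  · rw [if_pos hemp]
    rw [List.isEmpty_iff] at hemp
    rw [hemp]
    rfl
  · rw [if_neg hemp]
    rw [(paddedTuple_spec wild hnodupw m []).1, List.nil_append]
    exact List.map_congr_left (fun c _ => hrow c)

-- ===== VERDICT (by name: the statement is the Claim_ definition above) =====
theorem dobinarize_spec : Claim_equal_dobinarize := by
  intro ad memo _
  exact main_eq (pvLitPass ad memo).2 (nodup_litPass ad memo)
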